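/- GENERATED by farm/mkstatement.py from design/units.tsv (unit `vorbis_decode_packet_rest.2c`) and the assertions of Vorbis/Spec/PacketRest2.lean — do not edit.
   THE STATEMENT of the proof unit `vorbis_decode_packet_rest.2c`: segment 2c of `vorbis_decode_packet_rest` (9 instructions; entries 0x111403;
   exits 0x111426; ranges 0x111403-0x111421)
   takes each of its entry assertions to one of its exit assertions (`Vorbis.Spec.vorbis_decode_packet_rest.Seg2c`), given the contracts of its callees.
   What the names mean: Vorbis/Spec/Basic.lean (the shared hypotheses), Vorbis/Spec/PacketRest2.lean (the assertions). The theorem to prove: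
   `theorem vorbis_decode_packet_rest_2c_ok : Vorbis.Spec.vorbis_decode_packet_rest_2c.Statement`. -/
import Vorbis.Spec.Leaves2
import Vorbis.Spec.PacketRest2
import Vorbis.Spec.Reader
namespace Vorbis.Spec.vorbis_decode_packet_rest_2c
open X86 X86.User Asan

/-- The statement of unit `vorbis_decode_packet_rest.2c`. -/
def Statement : Prop :=
  ∀ (Lay : Layout) (_hLay : Lay.hi = 0x1000000) (μ : Microarch) (_hμ : UserX.MicroOK μ) (u₀ : State)
    (_hcode : HasCodeNat Lay u₀ Vorbis.L.vorbis_decode_packet_rest.entry Vorbis.Code.code_vorbis_decode_packet_rest.nat Vorbis.L.vorbis_decode_packet_rest.size)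
    (_h_get_bits : ∀ (others : List Obj) (frames : List (Nat × FrameLayout)) (Blk : Block → Prop) (len : Nat), Calls Lay μ Vorbis.WayInv (Vorbis.conv u₀) Vorbis.L.get_bits.entry (Vorbis.Spec.get_bits.spec others frames Blk len))
    (_h_ilog : ∀ (others : List Obj) (frames : List (Nat × FrameLayout)), Calls Lay μ Vorbis.WayInv (Vorbis.conv u₀) Vorbis.L.ilog.entry (Vorbis.Spec.ilog.spec others frames))
    (_h_asan_store2_noabort : Asan.SmallCheck Lay μ Vorbis.WayInv (Vorbis.CodeOK u₀) [.rax, .rcx, .rdx] 2 Vorbis.L.__asan_store2_noabort.entry),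
    Vorbis.Spec.vorbis_decode_packet_rest.Seg2c Lay μ u₀

end Vorbis.Spec.vorbis_decode_packet_rest_2c
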